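-- pv_equiv track=rewrite | github.com/jdb130496/code-snippets | xlwings + other UDFs + standalone py scripts/portable-msvc-fixed-20022026.py | find_package_with_pattern
-- ===== SOURCE A (Python) =====
-- def find_package_with_pattern(base_pattern, pkg_version, packages):
--   """
--   Find a package that matches the base pattern, trying different version formats.
--   Returns the actual package ID found, or None.
--   """
--   # Try exact match first
--   pkg_id = base_pattern.format(ver=pkg_version)
--   if pkg_id in packages:
--     return pkg_id
--
--   # If not found, try to find packages that match the base pattern structurally
--   # Extract the pattern structure (without version)
--   pattern_parts = base_pattern.replace("{ver}", "VERSION").split(".")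
--
--   for pid in packages.keys():
--     pid_parts = pid.split(".")
--     if len(pid_parts) != len(pattern_parts):
--       continue
--
--     # Check if structure matches (ignoring the version part)
--     match = True
--     for pp, pidp in zip(pattern_parts, pid_parts):
--       if pp == "VERSION":
--         # This should be numeric version components
--         continue
--       elif pp != pidp:
--         match = False
--         break
--
--     if match:
--       return pid
--
--   return None
-- ===== SOURCE B (Python) =====
-- import re
--
-- def find_package_with_pattern(base_pattern, pkg_version, packages):
--     """Regex-based reimplementation: compile the versioned base pattern once
--     (each '.'-separated segment that is exactly 'VERSION' becomes the wildcard
--     [^.]*, every other segment is matched literally) and return the first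
--     package id it fullmatches; the exact-match fast path is kept first."""
--     exact = base_pattern.format(ver=pkg_version)
--     if exact in packages:
--         return exact
--     segs = base_pattern.replace("{ver}", "VERSION").split(".")
--     rx = re.compile(r"\.".join("[^.]*" if seg == "VERSION" else re.escape(seg)
--                                for seg in segs))
--     return next((pid for pid in packages if rx.fullmatch(pid)), None)
-- ===== Notes on version B (the rewrite author's own statement) =====
-- stated objective: idiomatic
-- what changed: The hand-written split-and-zip structural comparison per package is replaced by one regex compiled once from the pattern (segments equal to 'VERSION' become [^.]*, others are escaped, joined by \.) and fullmatched against each package id.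
-- outside the precondition, e.g. on find_package_with_pattern('x{{y', '1', {}): A returns None, B returns None; on find_package_with_pattern('x{{y', '1', {'x{y': '1'}): A returns 'x{y', B returns 'x{y'
import Mathlib
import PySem

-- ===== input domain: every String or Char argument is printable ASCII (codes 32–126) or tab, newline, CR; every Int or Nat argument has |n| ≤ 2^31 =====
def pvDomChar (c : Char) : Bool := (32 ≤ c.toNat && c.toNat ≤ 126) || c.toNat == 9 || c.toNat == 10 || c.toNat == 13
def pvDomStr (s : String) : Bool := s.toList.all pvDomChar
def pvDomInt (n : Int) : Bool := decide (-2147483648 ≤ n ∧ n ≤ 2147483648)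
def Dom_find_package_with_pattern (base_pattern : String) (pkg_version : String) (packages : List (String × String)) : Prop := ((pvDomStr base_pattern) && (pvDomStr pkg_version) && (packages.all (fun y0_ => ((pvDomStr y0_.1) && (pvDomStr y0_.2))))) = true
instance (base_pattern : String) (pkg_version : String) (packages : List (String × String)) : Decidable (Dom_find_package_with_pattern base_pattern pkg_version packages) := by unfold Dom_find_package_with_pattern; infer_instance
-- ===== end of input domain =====

-- B replaces A's per-package split-and-zip structural comparison by one pattern compiled
-- once into a tiny regex (segment token list) that is fullmatched against each package id;
-- objective: idiomatic. Equivalence is about the return value on Pre_ below.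

-- ===== PORT A =====
-- base_pattern.format(ver=pkg_version): modeled as replacing every "{ver}" by pkg_version;
-- exact whenever base_pattern's braces occur only inside the literal "{ver}" (guaranteed by Pre_ below).
def pyFormatVer (bp v : String) : String := PySem.Str.replace bp "{ver}" v

-- the char list of "VERSION"
def verChars : List Char := ['V', 'E', 'R', 'S', 'I', 'O', 'N']

-- inner loop: `for pp, pidp in zip(pattern_parts, pid_parts): …`
def aMatchLoop : List (List Char × List Char) → Bool
  | [] => true
  | (pp, pidp) :: rest =>
      if pp = verChars then aMatchLoop rest          -- pp == "VERSION": continue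
      else if pp ≠ pidp then false                   -- elif pp != pidp: match = False; break
      else aMatchLoop rest

-- outer loop: `for pid in packages.keys(): …`
def aScan (patternParts : List (List Char)) : List String → Option String
  | [] => none
  | pid :: rest =>
      let pidParts := PySem.Chars.splitOn pid.toList ['.']   -- pid.split(".")
      if pidParts.length ≠ patternParts.length then aScan patternParts rest   -- continue
      else if aMatchLoop (patternParts.zip pidParts) then some pid            -- if match: return pid
      else aScan patternParts rest

def find_package_with_pattern (base_pattern : String) (pkg_version : String) (packages : List (String × String)) : Option String :=
  let pkg_id := pyFormatVer base_pattern pkg_version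
  if (packages.map Prod.fst).contains pkg_id then some pkg_id     -- if pkg_id in packages
  else
    -- pattern_parts = base_pattern.replace("{ver}", "VERSION").split(".")
    aScan (PySem.Chars.splitOn (PySem.Chars.replace base_pattern.toList ['{', 'v', 'e', 'r', '}'] verChars) ['.'])
          (packages.map Prod.fst)

-- ===== PORT B =====
-- the regex node: a literal character, or the wildcard [^.]* a 'VERSION' segment compiles to
inductive RTok
  | lit : Char → RTok
  | vstar : RTok
deriving DecidableEq

-- "[^.]*" if seg == "VERSION" else re.escape(seg): escaping makes every char of seg a literal
def tokSeg (seg : List Char) : List RTok :=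
  if seg = verChars then [RTok.vstar] else seg.map RTok.lit

-- rx = re.compile(r"\.".join(tokSeg(seg) for seg in segs))
def compilePat (segs : List (List Char)) : List RTok :=
  List.intercalate [RTok.lit '.'] (segs.map tokSeg)

-- rx.fullmatch: backtracking matcher for this token language ([^.]* is greedy-with-backtracking)
def rmatch : List RTok → List Char → Bool
  | [], [] => true
  | [], _ :: _ => false
  | RTok.lit _ :: _, [] => false
  | RTok.lit c :: ts, x :: xs => c == x && rmatch ts xs
  | RTok.vstar :: ts, [] => rmatch ts []
  | RTok.vstar :: ts, x :: xs =>
      rmatch ts (x :: xs) || (decide (x ≠ '.') && rmatch (RTok.vstar :: ts) xs)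
  termination_by ts s => (s.length, ts.length)

-- next((pid for pid in packages if rx.fullmatch(pid)), None)
def bScan (toks : List RTok) : List String → Option String
  | [] => none
  | pid :: rest => if rmatch toks pid.toList then some pid else bScan toks rest

def find_package_with_pattern_alt (base_pattern : String) (pkg_version : String) (packages : List (String × String)) : Option String :=
  let exact := pyFormatVer base_pattern pkg_version
  if (packages.map Prod.fst).contains exact then some exact
  else
    bScan (compilePat (PySem.Chars.splitOn (PySem.Chars.replace base_pattern.toList ['{', 'v', 'e', 'r', '}'] verChars) ['.']))
          (packages.map Prod.fst)

-- ===== PRECONDITION & SPEC =====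
-- Pre_ excludes base patterns whose braces occur outside the literal "{ver}" placeholder: there
-- str.format either raises ValueError/KeyError (stray single braces / other fields) or performs the
-- '{{'/'}}' escaping that the ports' simplified format (replace "{ver}") does not model, although A
-- still returns a value in the escaping case.
-- every '{' in base_pattern opens a literal "{ver}" and every '}' closes one
def braceOk : List Char → Bool
  | [] => true
  | '{' :: 'v' :: 'e' :: 'r' :: '}' :: rest => braceOk rest
  | '{' :: _ => false
  | '}' :: _ => false
  | _ :: rest => braceOk rest

def Pre_find_package_with_pattern (base_pattern : String) (pkg_version : String) (packages : List (String × String)) : Prop :=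
  braceOk base_pattern.toList = true
instance (base_pattern : String) (pkg_version : String) (packages : List (String × String)) : Decidable (Pre_find_package_with_pattern base_pattern pkg_version packages) := by unfold Pre_find_package_with_pattern; infer_instance

def pvWitness_find_package_with_pattern : String × String × (List (String × String)) :=
  ("a.{ver}", "14", [("a.15", "x")])

def Spec_find_package_with_pattern (base_pattern : String) (pkg_version : String) (packages : List (String × String)) (out : Option String) : Prop := out = find_package_with_pattern_alt base_pattern pkg_version packages
instance (base_pattern : String) (pkg_version : String) (packages : List (String × String)) (out : Option String) : Decidable (Spec_find_package_with_pattern base_pattern pkg_version packages out) := by unfold Spec_find_package_with_pattern; infer_instance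

-- ===== CLAIM (what is proved, stated in full; the proofs are below) =====
def Claim_equal_find_package_with_pattern : Prop := ∀ (base_pattern : String) (pkg_version : String) (packages : List (String × String)), Dom_find_package_with_pattern base_pattern pkg_version packages → Pre_find_package_with_pattern base_pattern pkg_version packages → Spec_find_package_with_pattern base_pattern pkg_version packages (find_package_with_pattern base_pattern pkg_version packages)

-- ===== LEMMAS AND PROOFS =====

-- a reference split on '.' (proof-side only): Python's s.split(".") at the char level
def mySplit : List Char → List (List Char)
  | [] => [[]]
  | c :: cs =>
      if c = '.' then [] :: mySplit cs
      else match mySplit cs with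
           | [] => [[c]]
           | p :: ps => (c :: p) :: ps

def consHead (p : List Char) : List (List Char) → List (List Char)
  | [] => [p]
  | q :: qs => (p ++ q) :: qs

theorem mySplit_ne_nil (s : List Char) : mySplit s ≠ [] := by
  cases s with
  | nil => simp [mySplit]
  | cons c cs =>
    simp only [mySplit]
    split
    · simp
    · split <;> simp

theorem mySplit_dotless (s : List Char) : ∀ w ∈ mySplit s, '.' ∉ w := by
  induction s with
  | nil => simp [mySplit]
  | cons c cs ih =>
    intro w hw
    by_cases hc : c = '.'
    · subst hc
      simp only [mySplit] at hw
      rcases List.mem_cons.mp hw with h1 | h2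
      · simp [h1]
      · exact ih w h2
    · simp only [mySplit, if_neg hc] at hw
      cases hp : mySplit cs with
      | nil => exact absurd hp (mySplit_ne_nil cs)
      | cons p ps =>
        rw [hp] at hw
        simp only [List.mem_cons] at hw
        rcases hw with rfl | hw
        · have hp' : '.' ∉ p := ih p (by rw [hp]; exact List.mem_cons_self)
          simp [Ne.symm hc, hp']
        · exact ih w (by rw [hp]; exact List.mem_cons_of_mem _ hw)

theorem mySplit_of_dotless (s : List Char) (h : '.' ∉ s) : mySplit s = [s] := by
  induction s with
  | nil => simp [mySplit]
  | cons c cs ih =>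
    simp only [List.mem_cons, not_or] at h
    simp only [mySplit, if_neg (Ne.symm h.1), ih h.2]

theorem mySplit_append_dot (a s' : List Char) (h : '.' ∉ a) :
    mySplit (a ++ '.' :: s') = a :: mySplit s' := by
  induction a with
  | nil => simp [mySplit]
  | cons c a' ih =>
    simp only [List.mem_cons, not_or] at h
    simp only [List.cons_append, mySplit, if_neg (Ne.symm h.1), ih h.2]

theorem dot_split_cases (s : List Char) :
    '.' ∉ s ∨ ∃ a s', '.' ∉ a ∧ s = a ++ '.' :: s' := by
  induction s with
  | nil => left; simp
  | cons c cs ih =>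
    by_cases hc : c = '.'
    · right; exact ⟨[], cs, by simp, by simp [hc]⟩
    · rcases ih with h | ⟨a, s', ha, rfl⟩
      · left; simp [Ne.symm hc, h]
      · right; exact ⟨c :: a, s', by simp [Ne.symm hc, ha], by simp⟩

-- clean equations for the fuelled splitter loop
theorem go_nil (fuel : Nat) (cur : List Char) (acc : List (List Char)) :
    PySem.Chars.splitOn.go ['.'] (fuel + 1) [] cur acc = (cur.reverse :: acc).reverse := by
  simp [PySem.Chars.splitOn.go]

theorem go_cons (fuel : Nat) (c : Char) (rest cur : List Char) (acc : List (List Char)) :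
    PySem.Chars.splitOn.go ['.'] (fuel + 1) (c :: rest) cur acc =
      if c = '.' then PySem.Chars.splitOn.go ['.'] fuel rest [] (cur.reverse :: acc)
      else PySem.Chars.splitOn.go ['.'] fuel rest (c :: cur) acc := by
  by_cases hc : c = '.'
  · simp [PySem.Chars.splitOn.go, List.isPrefixOf, hc]
  · simp [PySem.Chars.splitOn.go, List.isPrefixOf, hc, Ne.symm hc]

theorem go_eq (fuel : Nat) (l cur : List Char) (acc : List (List Char)) (h : l.length < fuel) :
    PySem.Chars.splitOn.go ['.'] fuel l cur acc = acc.reverse ++ consHead cur.reverse (mySplit l) := by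
  induction fuel generalizing l cur acc with
  | zero => omega
  | succ fuel ih =>
    cases l with
    | nil => simp [go_nil, consHead, mySplit]
    | cons c rest =>
      simp only [List.length_cons] at h
      have h' : rest.length < fuel := by omega
      rw [go_cons]
      by_cases hc : c = '.'
      · rw [if_pos hc, ih _ _ _ h', hc]
        cases hp : mySplit rest with
        | nil => exact absurd hp (mySplit_ne_nil rest)
        | cons p ps => simp [mySplit, consHead, hp]
      · rw [if_neg hc, ih _ _ _ h']
        cases hp : mySplit rest with
        | nil => exact absurd hp (mySplit_ne_nil rest)
        | cons p ps => simp [mySplit, consHead, hp, hc]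

theorem splitOn_eq_mySplit (s : List Char) : PySem.Chars.splitOn s ['.'] = mySplit s := by
  rw [PySem.Chars.splitOn, go_eq _ _ _ _ (Nat.lt_succ_self _)]
  cases h : mySplit s with
  | nil => exact absurd h (mySplit_ne_nil s)
  | cons p ps => simp [consHead]

-- compilePat unfoldings
theorem compilePat_singleton (t : List Char) : compilePat [t] = tokSeg t := by
  simp [compilePat, List.intercalate]

theorem compilePat_cons₂ (t u : List Char) (ts : List (List Char)) :
    compilePat (t :: u :: ts) = tokSeg t ++ RTok.lit '.' :: compilePat (u :: ts) := by
  simp [compilePat, List.intercalate]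

-- rmatch facts
theorem rmatch_nil (s : List Char) : rmatch [] s = s.isEmpty := by
  cases s <;> simp [rmatch]

theorem rmatch_vstar_end (s : List Char) : rmatch [RTok.vstar] s = !s.contains '.' := by
  induction s with
  | nil => simp [rmatch]
  | cons x xs ih =>
    by_cases hx : x = '.'
    · simp [rmatch, hx]
    · simp [rmatch, hx, Ne.symm hx, ih]

theorem rmatch_lits (w : List Char) (C : List RTok) (s : List Char) :
    rmatch (w.map RTok.lit ++ C) s = (w.isPrefixOf s && rmatch C (s.drop w.length)) := by
  induction w generalizing s with
  | nil => simp [List.isPrefixOf]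
  | cons c w' ih =>
    cases s with
    | nil => simp [rmatch, List.isPrefixOf]
    | cons x xs => simp [rmatch, List.isPrefixOf, ih, Bool.and_assoc]

theorem rmatch_vstar_dot (C : List RTok) (a s' : List Char) (ha : '.' ∉ a) :
    rmatch (RTok.vstar :: RTok.lit '.' :: C) (a ++ '.' :: s') = rmatch C s' := by
  induction a with
  | nil => simp [rmatch]
  | cons c a' ih =>
    simp only [List.mem_cons, not_or] at ha
    simp [rmatch, Ne.symm ha.1, ha.1, ih ha.2]

theorem rmatch_vstar_dot_dotless (C : List RTok) (s : List Char) (hs : '.' ∉ s) :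
    rmatch (RTok.vstar :: RTok.lit '.' :: C) s = false := by
  induction s with
  | nil => simp [rmatch]
  | cons x xs ih =>
    simp only [List.mem_cons, not_or] at hs
    simp [rmatch, Ne.symm hs.1, hs.1, ih hs.2]

theorem rmatch_lits_dot (w : List Char) (C : List RTok) (a s' : List Char)
    (hw : '.' ∉ w) (ha : '.' ∉ a) :
    rmatch (w.map RTok.lit ++ RTok.lit '.' :: C) (a ++ '.' :: s') = (w == a && rmatch C s') := by
  induction w generalizing a with
  | nil =>
    cases a with
    | nil => simp [rmatch]
    | cons d a' =>
      simp only [List.mem_cons, not_or] at ha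
      simp [rmatch, ha.1]
  | cons c w' ih =>
    simp only [List.mem_cons, not_or] at hw
    cases a with
    | nil => simp [rmatch, Ne.symm hw.1]
    | cons d a' =>
      simp only [List.mem_cons, not_or] at ha
      simp [rmatch, ih a' hw.2 ha.2, Bool.and_assoc]

theorem rmatch_lits_dot_dotless (w : List Char) (C : List RTok) (s : List Char)
    (hw : '.' ∉ w) (hs : '.' ∉ s) :
    rmatch (w.map RTok.lit ++ RTok.lit '.' :: C) s = false := by
  induction w generalizing s with
  | nil =>
    cases s with
    | nil => simp [rmatch]
    | cons x xs =>
      simp only [List.mem_cons, not_or] at hs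
      simp [rmatch, hs.1]
  | cons c w' ih =>
    simp only [List.mem_cons, not_or] at hw
    cases s with
    | nil => simp [rmatch]
    | cons x xs =>
      simp only [List.mem_cons, not_or] at hs
      simp [rmatch, ih xs hw.2 hs.2]

theorem prefix_drop_empty (w s : List Char) :
    (w.isPrefixOf s && (s.drop w.length).isEmpty) = (w == s) := by
  induction w generalizing s with
  | nil => cases s <;> simp [List.isPrefixOf]
  | cons c w' ih =>
    cases s with
    | nil => simp [List.isPrefixOf]
    | cons x xs => simp [List.isPrefixOf, ← ih, Bool.and_assoc]

-- the A-side decision for one package id, over the reference split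
def aDecide (segs : List (List Char)) (s : List Char) : Bool :=
  if (mySplit s).length ≠ segs.length then false
  else aMatchLoop (segs.zip (mySplit s))

theorem aDecide_cons (t : List Char) (ts : List (List Char)) (a s' : List Char) (ha : '.' ∉ a) :
    aDecide (t :: ts) (a ++ '.' :: s') = ((t == verChars || t == a) && aDecide ts s') := by
  unfold aDecide
  rw [mySplit_append_dot a s' ha]
  by_cases hlen : (mySplit s').length ≠ ts.length
  · simp [hlen]
  · simp only [List.length_cons, List.zip_cons_cons, ne_eq, not_not] at *
    by_cases hv : t = verChars
    · simp [hlen, aMatchLoop, hv]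
    · by_cases hta : t = a <;> simp [hlen, aMatchLoop, hv, hta]

theorem rmatch_eq_aDecide (segs : List (List Char)) (s : List Char)
    (hne : segs ≠ []) (hd : ∀ w ∈ segs, '.' ∉ w) :
    rmatch (compilePat segs) s = aDecide segs s := by
  induction segs generalizing s with
  | nil => exact absurd rfl hne
  | cons t ts ih =>
    have ht : '.' ∉ t := hd t List.mem_cons_self
    cases ts with
    | nil =>
      rw [compilePat_singleton]
      rcases dot_split_cases s with hs | ⟨a, s', ha, rfl⟩
      · have hsp := mySplit_of_dotless s hs
        by_cases hv : t = verChars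
        · simp [tokSeg, hv, rmatch_vstar_end, aDecide, aMatchLoop, hs, hsp]
        · simp only [tokSeg, if_neg hv]
          have : rmatch (t.map RTok.lit) s = (t == s) := by
            rw [show t.map RTok.lit = t.map RTok.lit ++ ([] : List RTok) by simp,
              rmatch_lits, rmatch_nil, prefix_drop_empty]
          rw [this]
          by_cases hts : t = s <;> simp [aDecide, hsp, aMatchLoop, hv, hts]
      · have hsp := mySplit_append_dot a s' ha
        by_cases hv : t = verChars
        · simp only [tokSeg, if_pos hv]
          rw [rmatch_vstar_end]
          simp [aDecide, hsp]
          intro hq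
          exact absurd hq (mySplit_ne_nil s')
        · simp only [tokSeg, if_neg hv]
          have : rmatch (t.map RTok.lit) (a ++ '.' :: s') = false := by
            rw [show t.map RTok.lit = t.map RTok.lit ++ ([] : List RTok) by simp,
              rmatch_lits, rmatch_nil, prefix_drop_empty]
            have : t ≠ a ++ '.' :: s' := by
              intro he; exact ht (by rw [he]; simp)
            simp [this]
          rw [this]
          simp [aDecide, hsp]
          intro hq
          exact absurd hq (mySplit_ne_nil s')
    | cons u ts' =>
      have hts : (u :: ts') ≠ [] := by simp
      have hd' : ∀ w ∈ u :: ts', '.' ∉ w := fun w hw => hd w (List.mem_cons_of_mem _ hw)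
      have key : ∀ r, rmatch (compilePat (u :: ts')) r = aDecide (u :: ts') r :=
        fun r => ih r hts hd'
      rw [compilePat_cons₂]
      rcases dot_split_cases s with hs | ⟨a, s', ha, rfl⟩
      · have hsp := mySplit_of_dotless s hs
        have hfalse : rmatch (tokSeg t ++ RTok.lit '.' :: compilePat (u :: ts')) s = false := by
          by_cases hv : t = verChars
          · simp only [tokSeg, if_pos hv]
            exact rmatch_vstar_dot_dotless _ _ hs
          · simp only [tokSeg, if_neg hv]
            exact rmatch_lits_dot_dotless _ _ _ ht hs
        rw [hfalse]
        simp [aDecide, hsp]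
      · rw [aDecide_cons _ _ _ _ ha, ← key s']
        by_cases hv : t = verChars
        · simp only [tokSeg, if_pos hv]
          rw [show ([RTok.vstar] ++ RTok.lit '.' :: compilePat (u :: ts')) =
              RTok.vstar :: RTok.lit '.' :: compilePat (u :: ts') from rfl]
          rw [rmatch_vstar_dot _ _ _ ha]
          simp [hv]
        · simp only [tokSeg, if_neg hv]
          rw [rmatch_lits_dot _ _ _ _ ht ha]
          have hvf : (t == verChars) = false := beq_eq_false_iff_ne.mpr hv
          rw [hvf]
          simp

-- the scans agree package by package
theorem aScan_eq_bScan (segs : List (List Char)) (pids : List String)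
    (hne : segs ≠ []) (hd : ∀ w ∈ segs, '.' ∉ w) :
    aScan segs pids = bScan (compilePat segs) pids := by
  induction pids with
  | nil => simp [aScan, bScan]
  | cons pid rest ih =>
    simp only [aScan, bScan, splitOn_eq_mySplit]
    rw [rmatch_eq_aDecide segs pid.toList hne hd]
    simp only [aDecide]
    by_cases hlen : (mySplit pid.toList).length ≠ segs.length
    · simp [hlen, ih]
    · simp only [if_neg hlen]
      split <;> simp [ih]

-- ===== VERDICT (by name: the statement is the Claim_ definition above) =====
theorem find_package_with_pattern_spec : Claim_equal_find_package_with_pattern := by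
  intro bp v pkgs _ _
  unfold Spec_find_package_with_pattern find_package_with_pattern find_package_with_pattern_alt
  by_cases h : (pkgs.map Prod.fst).contains (pyFormatVer bp v)
  · rw [if_pos h, if_pos h]
  · rw [if_neg h, if_neg h]
    rw [splitOn_eq_mySplit]
    exact aScan_eq_bScan _ _ (mySplit_ne_nil _) (mySplit_dotless _)
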